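-- pv_equiv track=rewrite | github.com/Swart-lab/bleties | bleties/SharedFunctions.py | getCigarOpQuerySeqs
-- ===== SOURCE A (Python) =====
-- def getCigarOpQuerySeqs(qseq, cigartuples, rstart, target_op="S"):
--     """Get sequence segments from a query sequence that correspond to a
--     specific CIGAR operation
--
--     Parameters
--     ----------
--     qseq : str
--         Query sequence
--     cigartuples : list
--         List of tuples of ints (operation, operation length) where operation is
--         CIGAR operation numbered 0-9 by BAM convention. Output from
--         pysam.AlignedSegment.cigartuples
--     rstart : int
--         Reference start position, 0-based
--     target_op : str
--         Name of CIGAR operation for which to report the sequence(s)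
--
--     Returns
--     -------
--     list
--         list of tuples (str, int, int, int, int) corresponding to: (sequence
--         segment, query start, query end, ref start, ref end) of each segment
--         corresponding to a specific CIGAR operation. Coordinates are 0-based.
--     """
--     op2bam = {"M": 0, "I": 1, "D": 2, "N": 3,
--               "S": 4, "H": 5, "P": 6, "=": 7, "X": 8}
--     if target_op not in op2bam:
--         raise Exception(f"Operation {target_op} not a valid CIGAR operation")
--     QUERY_CONSUMING = [0, 1, 4, 7, 8]
--     REF_CONSUMING = [0, 2, 3, 7, 8]
--
--     # initialize placeholders
--     rend = rstart
--     qstart = 0  # 0-based coordinates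
--     qend = qstart
--
--     out = []
--     for op, oplen in cigartuples:
--         if op in QUERY_CONSUMING:
--             qend = qstart + oplen
--         if op in REF_CONSUMING:
--             rend = rstart + oplen
--
--         if op == op2bam[target_op]:
--             out.append((qseq[qstart:qend],
--                         qstart, qend,
--                         rstart, rend))
--
--         # Update counters
--         qstart = qend
--         rstart = rend
--
--     if len(out) > 0:
--         return(out)
-- ===== SOURCE B (Python) =====
-- def getCigarOpQuerySeqs(qseq, cigartuples, rstart, target_op="S"):
--     op2bam = {"M": 0, "I": 1, "D": 2, "N": 3,
--               "S": 4, "H": 5, "P": 6, "=": 7, "X": 8}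
--     if target_op not in op2bam:
--         raise Exception(f"Operation {target_op} not a valid CIGAR operation")
--     QUERY_CONSUMING = {0, 1, 4, 7, 8}
--     REF_CONSUMING = {0, 2, 3, 7, 8}
--     t = op2bam[target_op]
--     # prefix-sum tables of consumed lengths: qcum[i]/rcum[i] are the
--     # query/reference positions before cigar op i
--     qcum = [0]
--     rcum = [rstart]
--     for op, oplen in cigartuples:
--         qcum.append(qcum[-1] + (oplen if op in QUERY_CONSUMING else 0))
--         rcum.append(rcum[-1] + (oplen if op in REF_CONSUMING else 0))
--     out = [(qseq[qs:qe], qs, qe, rs, re)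
--            for (op, _), qs, qe, rs, re
--            in zip(cigartuples, qcum, qcum[1:], rcum, rcum[1:])
--            if op == t]
--     return out or None
-- ===== Notes on version B (the rewrite author's own statement) =====
-- stated objective: alternative
-- what changed: Replaces A's running-counter loop with conditional append (mutable qstart/qend/rstart/rend state) by two prefix-sum tables of consumed query/reference lengths, consumed by a single zip/filter comprehension.
import Mathlib
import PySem

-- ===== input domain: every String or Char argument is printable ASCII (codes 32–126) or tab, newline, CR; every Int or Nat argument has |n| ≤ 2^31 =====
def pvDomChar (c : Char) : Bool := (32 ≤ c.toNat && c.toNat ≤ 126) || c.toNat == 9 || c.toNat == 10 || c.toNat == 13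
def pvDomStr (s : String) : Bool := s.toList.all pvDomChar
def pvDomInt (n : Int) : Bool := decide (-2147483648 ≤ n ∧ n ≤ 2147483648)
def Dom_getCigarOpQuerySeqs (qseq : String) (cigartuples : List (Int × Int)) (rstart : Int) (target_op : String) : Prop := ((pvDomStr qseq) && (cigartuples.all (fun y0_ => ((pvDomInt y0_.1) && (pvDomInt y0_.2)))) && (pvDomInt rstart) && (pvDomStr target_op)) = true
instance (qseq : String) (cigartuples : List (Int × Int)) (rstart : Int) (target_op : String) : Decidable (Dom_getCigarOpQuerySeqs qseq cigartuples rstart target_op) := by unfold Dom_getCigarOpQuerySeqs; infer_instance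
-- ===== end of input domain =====

-- B replaces A's running-counter loop with two prefix-sum tables (scanl) consumed by a
-- zip/filter comprehension (objective: alternative decomposition, same cost).

-- ===== PORT A =====
-- op2bam dict as an association list (lookup = first match)
def pvOp2bam : List (String × Int) :=
  [("M", 0), ("I", 1), ("D", 2), ("N", 3), ("S", 4), ("H", 5), ("P", 6), ("=", 7), ("X", 8)]

-- the for-loop of A, carrying (qstart, qend, rstart, rend) exactly as the Python does
def pvGoA (qseq : String) (t : Int) :
    List (Int × Int) → Int → Int → Int → Int → List (String × Int × Int × Int × Int)
  | [], _, _, _, _ => []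
  | (op, oplen) :: rest, qstart, qend, rstart, rend =>
    let qend := if (([0, 1, 4, 7, 8] : List Int).contains op) then qstart + oplen else qend
    let rend := if (([0, 2, 3, 7, 8] : List Int).contains op) then rstart + oplen else rend
    (if op == t then
      [(PySem.Str.slice qseq (some qstart) (some qend), qstart, qend, rstart, rend)]
     else []) ++ pvGoA qseq t rest qend qend rend rend

def getCigarOpQuerySeqs (qseq : String) (cigartuples : List (Int × Int)) (rstart : Int) (target_op : String) : Option (List (String × Int × Int × Int × Int)) :=
  match pvOp2bam.lookup target_op with
  | none => none   -- Python raises Exception here; excluded by Pre_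
  | some t =>
    let out := pvGoA qseq t cigartuples 0 0 rstart rstart
    if out.length > 0 then some out else none

-- ===== PORT B =====
def pvQC (op : Int) : Bool := op == 0 || op == 1 || op == 4 || op == 7 || op == 8
def pvRC (op : Int) : Bool := op == 0 || op == 2 || op == 3 || op == 7 || op == 8

def getCigarOpQuerySeqs_alt (qseq : String) (cigartuples : List (Int × Int)) (rstart : Int) (target_op : String) : Option (List (String × Int × Int × Int × Int)) :=
  match pvOp2bam.lookup target_op with
  | none => none   -- Python raises Exception here; excluded by Pre_
  | some t =>
    let qcum := cigartuples.scanl (fun acc p => acc + (if pvQC p.1 then p.2 else 0)) 0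
    let rcum := cigartuples.scanl (fun acc p => acc + (if pvRC p.1 then p.2 else 0)) rstart
    let out := (cigartuples.zip ((qcum.zip (qcum.drop 1)).zip (rcum.zip (rcum.drop 1)))).filterMap
      (fun x => if x.1.1 == t then
          some (PySem.Str.slice qseq (some x.2.1.1) (some x.2.1.2), x.2.1.1, x.2.1.2, x.2.2.1, x.2.2.2)
        else none)
    if out.length > 0 then some out else none

-- ===== PRECONDITION & SPEC =====
-- Pre_ excludes invalid target_op strings, on which the Python A (and B) raise Exception.
def Pre_getCigarOpQuerySeqs (qseq : String) (cigartuples : List (Int × Int)) (rstart : Int) (target_op : String) : Prop :=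
  target_op ∈ (["M", "I", "D", "N", "S", "H", "P", "=", "X"] : List String)
instance (qseq : String) (cigartuples : List (Int × Int)) (rstart : Int) (target_op : String) : Decidable (Pre_getCigarOpQuerySeqs qseq cigartuples rstart target_op) := by unfold Pre_getCigarOpQuerySeqs; infer_instance

def pvWitness_getCigarOpQuerySeqs : String × (List (Int × Int)) × Int × String :=
  ("ACGTAC", [(4, 2), (0, 3), (2, 1)], 10, "S")

def Spec_getCigarOpQuerySeqs (qseq : String) (cigartuples : List (Int × Int)) (rstart : Int) (target_op : String) (out : Option (List (String × Int × Int × Int × Int))) : Prop := out = getCigarOpQuerySeqs_alt qseq cigartuples rstart target_op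
instance (qseq : String) (cigartuples : List (Int × Int)) (rstart : Int) (target_op : String) (out : Option (List (String × Int × Int × Int × Int))) : Decidable (Spec_getCigarOpQuerySeqs qseq cigartuples rstart target_op out) := by unfold Spec_getCigarOpQuerySeqs; infer_instance

-- ===== CLAIM (what is proved, stated in full; the proofs are below) =====
def Claim_equal_getCigarOpQuerySeqs : Prop := ∀ (qseq : String) (cigartuples : List (Int × Int)) (rstart : Int) (target_op : String), Dom_getCigarOpQuerySeqs qseq cigartuples rstart target_op → Pre_getCigarOpQuerySeqs qseq cigartuples rstart target_op → Spec_getCigarOpQuerySeqs qseq cigartuples rstart target_op (getCigarOpQuerySeqs qseq cigartuples rstart target_op)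

-- ===== LEMMAS AND PROOFS =====

-- zipping a prefix-sum table with its own tail, one cons step
lemma pvZipScanlCons (f : Int → (Int × Int) → Int) (i : Int) (x : Int × Int) (xs : List (Int × Int)) :
    (List.scanl f i (x :: xs)).zip ((List.scanl f i (x :: xs)).drop 1)
      = (i, f i x) :: (List.scanl f (f i x) xs).zip ((List.scanl f (f i x) xs).drop 1) := by
  cases xs <;> simp [List.scanl_cons]

-- A's loop equals B's zip-of-prefix-sums comprehension, for any starting offsets.
lemma pvGoA_eq_scan (qseq : String) (t : Int) :
    ∀ (cts : List (Int × Int)) (qs rs : Int),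
      pvGoA qseq t cts qs qs rs rs =
      (cts.zip
        (((cts.scanl (fun acc p => acc + (if pvQC p.1 then p.2 else 0)) qs).zip
          ((cts.scanl (fun acc p => acc + (if pvQC p.1 then p.2 else 0)) qs).drop 1)).zip
         ((cts.scanl (fun acc p => acc + (if pvRC p.1 then p.2 else 0)) rs).zip
          ((cts.scanl (fun acc p => acc + (if pvRC p.1 then p.2 else 0)) rs).drop 1)))).filterMap
        (fun x => if x.1.1 == t then
            some (PySem.Str.slice qseq (some x.2.1.1) (some x.2.1.2), x.2.1.1, x.2.1.2, x.2.2.1, x.2.2.2)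
          else none) := by
  intro cts
  induction cts with
  | nil => intro qs rs; simp [pvGoA]
  | cons hd tl ih =>
    intro qs rs
    obtain ⟨op, oplen⟩ := hd
    have e1 : (if (([0, 1, 4, 7, 8] : List Int).contains op) then qs + oplen else qs)
        = qs + (if pvQC op then oplen else 0) := by
      have hq : (([0, 1, 4, 7, 8] : List Int).contains op) = pvQC op := by
        simp only [List.contains_cons, List.contains_nil, pvQC, Bool.or_false]
        simp [Bool.or_assoc]
      rw [hq]; cases h : pvQC op <;> simp
    have e2 : (if (([0, 2, 3, 7, 8] : List Int).contains op) then rs + oplen else rs)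
        = rs + (if pvRC op then oplen else 0) := by
      have hr : (([0, 2, 3, 7, 8] : List Int).contains op) = pvRC op := by
        simp only [List.contains_cons, List.contains_nil, pvRC, Bool.or_false]
        simp [Bool.or_assoc]
      rw [hr]; cases h : pvRC op <;> simp
    simp only [pvGoA]
    rw [e1, e2, ih, pvZipScanlCons, pvZipScanlCons]
    simp only [List.zip_cons_cons, List.filterMap_cons]
    by_cases h : (op == t) = true <;> simp [h]

-- ===== VERDICT (by name: the statement is the Claim_ definition above) =====
theorem getCigarOpQuerySeqs_spec : Claim_equal_getCigarOpQuerySeqs := by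
  intro qseq cts rstart top _ hpre
  unfold Spec_getCigarOpQuerySeqs getCigarOpQuerySeqs getCigarOpQuerySeqs_alt
  cases h : pvOp2bam.lookup top with
  | none =>
    -- Pre_ rules this branch out: a valid target_op always has a lookup entry
    exfalso
    unfold Pre_getCigarOpQuerySeqs at hpre
    simp only [List.mem_cons, List.not_mem_nil, or_false] at hpre
    rcases hpre with h' | h' | h' | h' | h' | h' | h' | h' | h' <;> subst h' <;>
      simp [pvOp2bam] at h
  | some t => simp only [pvGoA_eq_scan]
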